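-- pv_equiv track=rewrite | github.com/ChethanAvinash/Arth_DSA | Recursion/Day-2 (18-06-2021)/Staircase_Traversal/Staircase_Traversal.py | getWaysDP
-- ===== SOURCE A (Python) =====
-- def getWaysDP(height,maxSteps):
--     dp = [0]*(height+1)
--
--     # Every element in the dp list indicates the number of ways to reach the final step from the corresponding height
--
--     dp[height] = 1
--
--     #there is one way to reach the last step from the last step itself i.e we don't jump
--
--     for i in range(height-1,-1,-1):
--         for j in range(1,maxSteps+1):
--             if i+j<len(dp):
--                 dp[i] = dp[i] + dp[i+j]
--
--     return dp[0]
-- ===== SOURCE B (Python) =====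
-- def getWaysDP(height, maxSteps):
--     # sliding-window DP: ways[n] = number of ways to climb n steps
--     # maintained running window sum of the last min(n, k) entries
--     k = max(maxSteps, 0)
--     ways = [1]
--     window = 0
--     for n in range(1, height + 1):
--         window += ways[-1]
--         if n > k:
--             window -= ways[n - k - 1]
--         ways.append(window)
--     return ways[-1]
-- ===== Notes on version B (the rewrite author's own statement) =====
-- stated objective: faster
-- what changed: Replaces A's backward table with an O(maxSteps) inner re-summing loop per step by a forward DP keeping a sliding-window running sum, removing the inner loop entirely.
import Mathlib
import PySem

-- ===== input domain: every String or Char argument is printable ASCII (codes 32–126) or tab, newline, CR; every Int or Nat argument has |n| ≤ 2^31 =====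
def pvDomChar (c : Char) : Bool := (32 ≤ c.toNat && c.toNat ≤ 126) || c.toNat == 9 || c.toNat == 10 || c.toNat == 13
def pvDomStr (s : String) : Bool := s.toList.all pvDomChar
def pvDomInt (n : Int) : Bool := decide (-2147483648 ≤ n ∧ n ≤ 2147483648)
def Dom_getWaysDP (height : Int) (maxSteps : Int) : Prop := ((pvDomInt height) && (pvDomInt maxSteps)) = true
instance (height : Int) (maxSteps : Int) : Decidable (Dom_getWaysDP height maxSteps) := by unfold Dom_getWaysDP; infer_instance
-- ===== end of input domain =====

-- B replaces A's backward table with inner re-summing loop by a forward sliding-window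
-- running-sum DP (objective: faster, one loop instead of two nested ones).

-- ===== PORT A =====
def getWaysDP (height : Int) (maxSteps : Int) : Int :=
  let dp := PySem.List.pyRepeat [(0 : Int)] (height + 1)
  let dp := PySem.List.pySetD dp height 1
  let dp := (PySem.List.pyRange (height - 1) (-1) (-1)).foldl (fun dp i =>
      (PySem.List.pyRange 1 (maxSteps + 1) 1).foldl (fun dp j =>
        if i + j < (dp.length : Int) then
          PySem.List.pySetD dp i (PySem.List.pyGetD dp i 0 + PySem.List.pyGetD dp (i + j) 0)
        else dp) dp) dp
  PySem.List.pyGetD dp 0 0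

-- ===== PORT B =====
-- Python's list is ported as Array (append = push). 'ways[-1]' is exact: ways is never
-- empty, so it is the last element; 'ways[n-k-1]' is exact: under the guard n > k ≥ 0
-- the index lies in [0, len(ways)), so plain Nat indexing agrees with Python.
def getWaysDP_alt (height : Int) (maxSteps : Int) : Int :=
  let k := max maxSteps 0
  let st := (PySem.List.pyRange 1 (height + 1) 1).foldl (fun (st : Array Int × Int) n =>
      let window := st.2 + st.1.getD (st.1.size - 1) 0
      let window := if n > k then window - st.1.getD (n - k - 1).toNat 0 else window
      (st.1.push window, window)) (#[1], 0)
  st.1.getD (st.1.size - 1) 0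

-- ===== PRECONDITION & SPEC =====
-- A raises IndexError (dp[height] on a too-short/empty dp) whenever height < 0.
def Pre_getWaysDP (height : Int) (maxSteps : Int) : Prop := 0 ≤ height
instance (height : Int) (maxSteps : Int) : Decidable (Pre_getWaysDP height maxSteps) := by
  unfold Pre_getWaysDP; infer_instance
def pvWitness_getWaysDP : Int × Int := (5, 2)

def Spec_getWaysDP (height : Int) (maxSteps : Int) (out : Int) : Prop := out = getWaysDP_alt height maxSteps
instance (height : Int) (maxSteps : Int) (out : Int) : Decidable (Spec_getWaysDP height maxSteps out) := by unfold Spec_getWaysDP; infer_instance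

-- ===== CLAIM (what is proved, stated in full; the proofs are below) =====
def Claim_equal_getWaysDP : Prop := ∀ (height : Int) (maxSteps : Int), Dom_getWaysDP height maxSteps → Pre_getWaysDP height maxSteps → Spec_getWaysDP height maxSteps (getWaysDP height maxSteps)

-- ===== LEMMAS AND PROOFS =====

-- reference function: number of compositions of n into parts of size 1..K
def gfun (K : Nat) : Nat → Int
  | 0 => 1
  | n + 1 => ∑ j ∈ Finset.range (min K (n + 1)), gfun K (n - j)
decreasing_by omega

-- sliding-window sum: sum of the last min K n values gfun K i, i < n
def wsum (K n : Nat) : Int := ∑ i ∈ Finset.Ico (n - min K n) n, gfun K i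

-- gfun equation and basics
theorem gfun_zero (K : Nat) : gfun K 0 = 1 := by simp [gfun]

theorem gfun_succ (K n : Nat) :
    gfun K (n + 1) = ∑ j ∈ Finset.range (min K (n + 1)), gfun K (n - j) := by
  simp [gfun]

-- gfun (n+1) is the sliding-window sum
theorem gfun_succ_eq_wsum (K n : Nat) : gfun K (n + 1) = wsum K (n + 1) := by
  have hr : min K (n + 1) ≤ n + 1 := Nat.min_le_right _ _
  rw [gfun_succ, wsum]
  rw [Finset.sum_Ico_eq_sum_range]
  have hlen : n + 1 - (n + 1 - min K (n + 1)) = min K (n + 1) := by omega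
  rw [hlen]
  rw [← Finset.sum_range_reflect]
  apply Finset.sum_congr rfl
  intro j hj
  simp only [Finset.mem_range] at hj
  congr 1
  omega

-- window update identity
theorem wsum_step (K m : Nat) :
    wsum K m + gfun K m - (if K ≤ m then gfun K (m - K) else 0) = wsum K (m + 1) := by
  by_cases h : K ≤ m
  · rcases Nat.eq_zero_or_pos K with hK | hK
    · subst hK
      simp only [if_pos h, wsum]
      have h1 : m - min 0 m = m := by omega
      have h2 : m + 1 - min 0 (m + 1) = m + 1 := by omega
      rw [h1, h2]
      simp
    · simp only [if_pos h, wsum]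
      have h1 : m - min K m = m - K := by omega
      have h2 : m + 1 - min K (m + 1) = m - K + 1 := by omega
      rw [h1, h2]
      rw [Finset.sum_Ico_succ_top (by omega : m - K + 1 ≤ m)]
      rw [Finset.sum_eq_sum_Ico_succ_bot (by omega : m - K < m)]
      ring
  · simp only [if_neg h, wsum]
    have h1 : m - min K m = 0 := by omega
    have h2 : m + 1 - min K (m + 1) = 0 := by omega
    rw [h1, h2, Finset.sum_Ico_succ_top (by omega : 0 ≤ m)]
    ring

-- A's dp after processing indices down to i (positions ≥ i hold final values)
def dpA (H K i : Nat) : List Int :=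
  (List.range (H + 1)).map (fun j => if i ≤ j then gfun K (H - j) else 0)

theorem dpA_length (H K i : Nat) : (dpA H K i).length = H + 1 := by simp [dpA]

theorem dpA_getD (H K i j : Nat) :
    (dpA H K i).getD j 0 = if i ≤ j ∧ j < H + 1 then gfun K (H - j) else 0 := by
  by_cases hj : j < H + 1
  · rw [List.getD_eq_getElem _ _ (by simp [dpA_length, hj])]
    simp [dpA, hj]
  · rw [List.getD_eq_default _ _ (by simp [dpA_length]; omega)]
    simp [hj]

theorem dpA_set_self (H K i : Nat) (v : Int) (hv : v = 0) :
    (dpA H K (i + 1)).set i v = dpA H K (i + 1) := by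
  subst hv
  apply List.ext_getElem (by simp [dpA_length])
  intro n h1 h2
  rw [List.getElem_set]
  split_ifs with h
  · subst h
    simp only [dpA, List.getElem_map, List.getElem_range]
    rw [if_neg (by omega)]
  · rfl

theorem dpA_set_final (H K i : Nat) (hi : i < H + 1) :
    (dpA H K (i + 1)).set i (gfun K (H - i)) = dpA H K i := by
  apply List.ext_getElem (by simp [dpA_length])
  intro n h1 h2
  rw [List.getElem_set]
  simp only [dpA, List.getElem_map, List.getElem_range]
  split_ifs with h hle hle' <;> first | rfl | (subst h; rfl) | omega

-- partial inner-loop sum at inner counter m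
def psum (H K i m : Nat) : Int :=
  ∑ t ∈ Finset.range (min m (H - i)), gfun K (H - i - 1 - t)

theorem psum_K (H K i : Nat) (hi : i < H) : psum H K i K = gfun K (H - i) := by
  have h : H - i = (H - i - 1) + 1 := by omega
  rw [psum, h, gfun_succ]
  simp

-- one full inner loop starting from the state with positions > i final
theorem innerInv (H K i : Nat) (hi : i < H) (M : Nat) :
    ((List.range M).map (fun t : Nat => ((1 : Int) + (t : Int)))).foldl
      (fun dp j =>
        if (i : Int) + j < (dp.length : Int) then
          PySem.List.pySetD dp (i : Int) (PySem.List.pyGetD dp (i : Int) 0 + PySem.List.pyGetD dp ((i : Int) + j) 0)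
        else dp)
      (dpA H K (i + 1))
    = (dpA H K (i + 1)).set i (psum H K i M) := by
  induction M with
  | zero =>
      simp [psum, dpA_set_self]
  | succ M ih =>
      rw [List.range_succ, List.map_append, List.foldl_append, ih]
      simp only [List.map_cons, List.map_nil, List.foldl_cons, List.foldl_nil]
      have hlen : (((dpA H K (i + 1)).set i (psum H K i M)).length : Int) = (H : Int) + 1 := by
        simp [dpA_length]
      rw [hlen]
      by_cases hg : (i : Int) + (1 + (M : Int)) < (H : Int) + 1
      · rw [if_pos hg]
        have hi1 : i < H + 1 := by omega
        have hMlt : M < H - i := by omega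
        have hcast : (i : Int) + (1 + (M : Int)) = ((i + M + 1 : Nat) : Int) := by push_cast; ring
        rw [hcast]
        rw [PySem.List.pySetD_natCast, PySem.List.pyGetD_natCast, PySem.List.pyGetD_natCast]
        rw [List.set_set]
        -- value at i is the partial sum
        have hvi : (((dpA H K (i + 1)).set i (psum H K i M))).getD i 0 = psum H K i M := by
          rw [List.getD_eq_getElem _ _ (by simp [dpA_length]; omega)]
          rw [List.getElem_set_self (by simp [dpA_length]; omega)]
        -- value at i+M+1 is a final value
        have hvj : (((dpA H K (i + 1)).set i (psum H K i M))).getD (i + M + 1) 0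
            = gfun K (H - i - 1 - M) := by
          rw [List.getD_eq_getElem _ _ (by simp [dpA_length]; omega)]
          rw [List.getElem_set_ne (by omega)]
          rw [← List.getD_eq_getElem _ _ (by simp [dpA_length]; omega)]
          rw [dpA_getD, if_pos ⟨by omega, by omega⟩]
          congr 1
          omega
        rw [hvi, hvj]
        congr 1
        rw [psum, psum, Nat.min_eq_left (by omega), Nat.min_eq_left (by omega),
          Finset.sum_range_succ]
      · rw [if_neg hg]
        congr 1
        rw [psum, psum, Nat.min_eq_right (by omega), Nat.min_eq_right (by omega)]

theorem dpA_init (H K : Nat) : (List.replicate (H + 1) (0 : Int)).set H 1 = dpA H K H := by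
  apply List.ext_getElem (by simp [dpA_length])
  intro n h1 h2
  rw [List.getElem_set]
  simp only [dpA, List.getElem_map, List.getElem_range, List.getElem_replicate]
  have hlen : n < H + 1 := by simpa [dpA_length] using h2
  by_cases hn : H = n
  · subst hn
    rw [if_pos rfl, if_pos (le_refl H), show H - H = 0 by omega, gfun_zero]
  · rw [if_neg hn, if_neg (by omega)]

theorem outerInv (H K : Nat) (m : Nat) (hm : m ≤ H) :
    ((List.range m).map (fun k : Nat => ((H : Int) - 1 - (k : Int)))).foldl
      (fun dp i =>
        ((List.range K).map (fun t : Nat => ((1 : Int) + (t : Int)))).foldl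
          (fun dp j =>
            if i + j < (dp.length : Int) then
              PySem.List.pySetD dp i (PySem.List.pyGetD dp i 0 + PySem.List.pyGetD dp (i + j) 0)
            else dp) dp)
      (dpA H K H)
    = dpA H K (H - m) := by
  induction m with
  | zero => simp
  | succ m ih =>
      rw [List.range_succ, List.map_append, List.foldl_append, ih (by omega)]
      simp only [List.map_cons, List.map_nil, List.foldl_cons, List.foldl_nil]
      have hi : (H : Int) - 1 - (m : Int) = ((H - 1 - m : Nat) : Int) := by omega
      have hstate : H - m = (H - 1 - m) + 1 := by omega
      rw [hi, hstate, innerInv H K (H - 1 - m) (by omega) K, psum_K H K (H - 1 - m) (by omega)]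
      rw [dpA_set_final H K (H - 1 - m) (by omega)]
      all_goals (congr 1; omega)

theorem portA_val (height maxSteps : Int) (h0 : 0 ≤ height) :
    getWaysDP height maxSteps = gfun maxSteps.toNat height.toNat := by
  have hh : height = (height.toNat : Int) := (Int.toNat_of_nonneg h0).symm
  rw [getWaysDP, hh]
  generalize height.toNat = H
  generalize hK : maxSteps.toNat = K
  have h1 : PySem.List.pyRepeat [(0 : Int)] ((H : Int) + 1) = List.replicate (H + 1) 0 := by
    rw [PySem.List.pyRepeat_singleton, show ((H : Int) + 1).toNat = H + 1 by omega]
  have h2 : PySem.List.pySetD (List.replicate (H + 1) (0 : Int)) (H : Int) 1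
      = dpA H K H := by
    rw [PySem.List.pySetD_natCast, dpA_init]
  have h3 : PySem.List.pyRange ((H : Int) - 1) (-1) (-1)
      = (List.range H).map (fun k : Nat => ((H : Int) - 1 - (k : Int))) := by
    rw [PySem.List.pyRange_neg_one, show (((H : Int) - 1) - (-1)).toNat = H by omega]
  have h4 : PySem.List.pyRange 1 (maxSteps + 1) 1
      = (List.range K).map (fun t : Nat => ((1 : Int) + (t : Int))) := by
    rw [PySem.List.pyRange_one, show ((maxSteps + 1) - 1).toNat = K by omega]
  simp only [h1, h2, h3, h4]
  rw [outerInv H K H (le_refl H)]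
  rw [show PySem.List.pyGetD (dpA H K (H - H)) 0 0 = (dpA H K (H - H)).getD 0 0 from
    PySem.List.pyGetD_zero _ _]
  rw [show H - H = 0 by omega, dpA_getD, if_pos ⟨by omega, by omega⟩]
  simp

theorem toArray_getD (l : List Int) (i : Nat) (d : Int) : l.toArray.getD i d = l.getD i d := by
  unfold Array.getD
  split
  · rw [List.getD_eq_getElem _ _ (by simpa using ‹_›)]
    simp
  · rw [List.getD_eq_default _ _ (by simp at *; omega)]

theorem bInv (K m : Nat) :
    ((List.range m).map (fun t : Nat => ((1 : Int) + (t : Int)))).foldl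
      (fun (st : Array Int × Int) n =>
        let window := st.2 + st.1.getD (st.1.size - 1) 0
        let window := if n > (K : Int) then window - st.1.getD (n - (K : Int) - 1).toNat 0 else window
        (st.1.push window, window)) (#[1], 0)
    = (((List.range (m + 1)).map (fun n : Nat => gfun K n)).toArray, wsum K m) := by
  induction m with
  | zero =>
      simp [wsum, gfun_zero]
  | succ m ih =>
      rw [List.range_succ, List.map_append, List.foldl_append, ih]
      simp only [List.map_cons, List.map_nil, List.foldl_cons, List.foldl_nil]
      have hsz : (((List.range (m + 1)).map (fun n : Nat => gfun K n)).toArray).size - 1 = m := by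
        simp
      have hlast : (((List.range (m + 1)).map (fun n : Nat => gfun K n)).toArray).getD m 0
          = gfun K m := by
        rw [toArray_getD, List.getD_eq_getElem _ _ (by simp)]
        simp
      have hwin : (if ((1 : Int) + (m : Int)) > (K : Int) then
            wsum K m + gfun K m - (((List.range (m + 1)).map (fun n : Nat => gfun K n)).toArray).getD (((1 : Int) + (m : Int)) - (K : Int) - 1).toNat 0
          else wsum K m + gfun K m) = wsum K (m + 1) := by
        by_cases h : K ≤ m
        · rw [if_pos (by omega)]
          have hidx : (((1 : Int) + (m : Int)) - (K : Int) - 1).toNat = m - K := by omega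
          rw [hidx, toArray_getD]
          rw [List.getD_eq_getElem _ _ (by simp only [List.length_map, List.length_range]; omega)]
          simp only [List.getElem_map, List.getElem_range]
          rw [← wsum_step K m]
          try rw [if_pos h]
        · rw [if_neg (by omega), ← wsum_step K m, if_neg h]
          ring
      simp only [hsz, hlast, hwin]
      refine Prod.ext ?_ rfl
      simp only []
      rw [List.push_toArray]
      rw [List.range_succ (n := m + 1), List.map_append]
      simp only [List.map_cons, List.map_nil]
      rw [← gfun_succ_eq_wsum]

theorem portB_val (height maxSteps : Int) (h0 : 0 ≤ height) :
    getWaysDP_alt height maxSteps = gfun maxSteps.toNat height.toNat := by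
  have hh : height = (height.toNat : Int) := (Int.toNat_of_nonneg h0).symm
  rw [getWaysDP_alt, hh]
  generalize height.toNat = H
  generalize hK : maxSteps.toNat = K
  have hk : max maxSteps 0 = (K : Int) := by omega
  have h4 : PySem.List.pyRange 1 ((H : Int) + 1) 1
      = (List.range H).map (fun t : Nat => ((1 : Int) + (t : Int))) := by
    rw [PySem.List.pyRange_one, show (((H : Int) + 1) - 1).toNat = H by omega]
  simp only [hk, h4]
  rw [bInv K H]
  rw [show (((List.range (H + 1)).map (fun n : Nat => gfun K n)).toArray).size - 1 = H by simp]
  rw [toArray_getD, List.getD_eq_getElem _ _ (by simp)]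
  simp

theorem getWaysDP_spec : Claim_equal_getWaysDP := by
  intro height maxSteps _ hpre
  unfold Spec_getWaysDP
  rw [portA_val height maxSteps hpre, portB_val height maxSteps hpre]
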